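-- pv_equiv track=rewrite | github.com/aneeshbukya/CodePath-TIP-102 | Unit 2/unit2.py | num_equiv_species_pairs
-- ===== SOURCE A (Python) =====
-- def num_equiv_species_pairs(species_pairs):
--     # Step 1: Initialize a dictionary to store the frequency of each sorted pair
--     pair_count = {}
--
--     # Step 2: Loop through the species pairs, sort each one, and update the count in the dictionary
--     for pair in species_pairs:
--         sorted_pair = tuple(sorted(pair))  # Sort the pair to handle (a, b) and (b, a)
--         if sorted_pair in pair_count:
--             pair_count[sorted_pair] += 1
--         else:
--             pair_count[sorted_pair] = 1
--
--     # Step 3: Initialize a variable to store the total number of equivalent pairs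
--     equiv_pairs = 0
--
--     # Step 4: For each pair in the dictionary with a count > 1, calculate equivalent pairs
--     for count in pair_count.values():
--         if count > 1:
--             equiv_pairs += count * (count - 1) // 2  # Use the combination formula for n pairs
--
--     # Step 5: Return the total number of equivalent pairs
--     return equiv_pairs
-- ===== SOURCE B (Python) =====
-- def num_equiv_species_pairs(species_pairs):
--     # One pass: each pair contributes the number of equivalent pairs already seen,
--     # using the identity sum_c c*(c-1)//2 == sum over arrivals of the prior count.
--     seen = {}
--     equiv_pairs = 0
--     for a, b in species_pairs:
--         key = (a, b) if a <= b else (b, a)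
--         c = seen.get(key, 0)
--         equiv_pairs += c
--         seen[key] = c + 1
--     return equiv_pairs
-- ===== Notes on version B (the rewrite author's own statement) =====
-- stated objective: alternative
-- what changed: Replaces the two-pass count-then-combination-formula (build a full counter, then sum count*(count-1)//2) with a single incremental pass that adds the prior count of each normalized pair to a running total, eliminating the second loop and the combination formula.
import Mathlib
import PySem

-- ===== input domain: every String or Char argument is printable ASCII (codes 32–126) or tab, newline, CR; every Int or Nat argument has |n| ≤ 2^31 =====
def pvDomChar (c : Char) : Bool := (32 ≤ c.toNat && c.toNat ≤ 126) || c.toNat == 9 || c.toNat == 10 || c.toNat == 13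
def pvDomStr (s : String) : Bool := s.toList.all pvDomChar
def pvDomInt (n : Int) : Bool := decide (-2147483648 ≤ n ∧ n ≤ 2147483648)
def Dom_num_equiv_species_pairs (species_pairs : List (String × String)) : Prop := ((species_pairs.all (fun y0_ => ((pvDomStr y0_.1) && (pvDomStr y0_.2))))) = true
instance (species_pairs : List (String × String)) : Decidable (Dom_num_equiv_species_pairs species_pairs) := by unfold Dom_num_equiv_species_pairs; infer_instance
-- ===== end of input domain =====

-- B replaces A's two-pass counter + combination formula with one incremental pass
-- adding each pair's prior count to a running total (alternative decomposition, same cost).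


-- ===== PORT A =====
-- tuple(sorted(pair)) for a 2-tuple (Python sorts via the list sort; exact for ASCII strings)
def pvKeyA (pair : String × String) : String × String :=
  match PySem.List.sorted [pair.1, pair.2] (fun x => x) false with
  | [a, b] => (a, b)
  | _ => (pair.1, pair.2)

def num_equiv_species_pairs (species_pairs : List (String × String)) : Int :=
  let pair_count : PySem.Dict (String × String) Int :=
    species_pairs.foldl (fun d pair =>
      let sorted_pair := pvKeyA pair
      if d.contains sorted_pair then d.insert sorted_pair (d.getD sorted_pair 0 + 1)
      else d.insert sorted_pair 1) PySem.Dict.empty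
  pair_count.values.foldl (fun equiv_pairs count =>
    if count > 1 then equiv_pairs + PySem.Int.floordiv (count * (count - 1)) 2 else equiv_pairs) 0

-- ===== PORT B =====
def num_equiv_species_pairs_alt (species_pairs : List (String × String)) : Int :=
  (species_pairs.foldl (fun st pair =>
      let key := if pair.1 ≤ pair.2 then (pair.1, pair.2) else (pair.2, pair.1)
      let c := st.1.getD key 0
      (st.1.insert key (c + 1), st.2 + c))
    ((PySem.Dict.empty : PySem.Dict (String × String) Int), (0 : Int))).2

-- ===== PRECONDITION & SPEC =====
def Spec_num_equiv_species_pairs (species_pairs : List (String × String)) (out : Int) : Prop := out = num_equiv_species_pairs_alt species_pairs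
instance (species_pairs : List (String × String)) (out : Int) : Decidable (Spec_num_equiv_species_pairs species_pairs out) := by unfold Spec_num_equiv_species_pairs; infer_instance

-- ===== CLAIM (what is proved, stated in full; the proofs are below) =====
def Claim_equal_num_equiv_species_pairs : Prop := ∀ (species_pairs : List (String × String)), Dom_num_equiv_species_pairs species_pairs → Spec_num_equiv_species_pairs species_pairs (num_equiv_species_pairs species_pairs)

-- ===== LEMMAS AND PROOFS =====

-- proof-only names for the two loop bodies (definitionally the ports' lambdas)
def pvAStep (d : PySem.Dict (String × String) Int) (pair : String × String) : PySem.Dict (String × String) Int :=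
  let sorted_pair := pvKeyA pair
  if d.contains sorted_pair then d.insert sorted_pair (d.getD sorted_pair 0 + 1)
  else d.insert sorted_pair 1

def pvBStep (st : PySem.Dict (String × String) Int × Int) (pair : String × String) :
    PySem.Dict (String × String) Int × Int :=
  let key := if pair.1 ≤ pair.2 then (pair.1, pair.2) else (pair.2, pair.1)
  let c := st.1.getD key 0
  (st.1.insert key (c + 1), st.2 + c)

-- the per-count contribution of A's second loop
def pvG (c : Int) : Int := if c > 1 then PySem.Int.floordiv (c * (c - 1)) 2 else 0

-- both key computations agree
theorem pvKeyA_eq (p : String × String) :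
    pvKeyA p = if p.1 ≤ p.2 then (p.1, p.2) else (p.2, p.1) := by
  unfold pvKeyA
  rw [PySem.List.sorted_eq_foldl_insertBy]
  simp only [List.foldl, PySem.List.insertBy]
  rcases lt_or_ge p.2 p.1 with h | h
  · simp [h, not_le.mpr h]
  · simp [not_lt.mpr h, h]

-- A's second loop is the sum of pvG over the values
theorem pvFoldA2 (vs : List Int) (a : Int) :
    vs.foldl (fun equiv_pairs count =>
      if count > 1 then equiv_pairs + PySem.Int.floordiv (count * (count - 1)) 2 else equiv_pairs) a
    = a + (vs.map pvG).sum := by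
  induction vs generalizing a with
  | nil => simp
  | cons c t ih =>
    simp only [List.foldl, List.map, List.sum_cons]
    rw [ih]
    by_cases h : c > 1
    · simp only [pvG, h, if_pos]; ring
    · simp [pvG, h]

theorem pvG_succ (c : Int) (hc : 0 ≤ c) : pvG (c + 1) = pvG c + c := by
  unfold pvG
  rcases eq_or_lt_of_le hc with h | h
  · subst h; decide
  · have h1 : (1:Int) ≤ c := h
    have hgt : c + 1 > 1 := by omega
    simp only [hgt, if_pos]
    by_cases h2 : c > 1
    · simp only [h2, if_pos]
      have : (c + 1) * (c + 1 - 1) = c * (c - 1) + c * 2 := by ring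
      rw [this]
      simp [PySem.Int.floordiv, Int.add_mul_fdiv_right _ _ (by norm_num : (2:Int) ≠ 0)]
    · have hc1 : c = 1 := by omega
      subst hc1; decide

-- replacing the (unique) entry at key k by (k, c+1) changes the pvG-sum by pvG(c+1) - pvG(c)
theorem pvSum_replace (its : List ((String × String) × Int)) (k : String × String) (c : Int)
    (hnd : (its.map Prod.fst).Nodup) (hmem : (k, c) ∈ its) :
    ((its.map (fun p => if p.1 == k then (k, c + 1) else p)).map (fun p => pvG p.2)).sum
      = ((its.map (fun p => pvG p.2)).sum - pvG c) + pvG (c + 1) := by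
  induction its with
  | nil => cases hmem
  | cons q t ih =>
    simp only [List.map_cons, List.nodup_cons, List.mem_map] at hnd
    by_cases hq : q.1 = k
    · -- head has key k; by nodup (k,c) must be the head
      have hqc : q = (k, c) := by
        rcases List.mem_cons.mp hmem with h | h
        · exact h.symm
        · exact absurd ⟨(k, c), h, by simp [hq]⟩ hnd.1
      subst hqc
      have htail : (t.map (fun p => if p.1 == k then (k, c + 1) else p)) = t := by
        trans (t.map id)
        · apply List.map_congr_left
          intro p hp
          have hne : p.1 ≠ k := by
            intro hpk
            exact hnd.1 ⟨p, hp, by simp [hpk]⟩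
          simp [hne]
        · simp
      have hhead : (if (((k, c).1 == k) = true) then (k, c + 1) else (k, c)) = (k, c + 1) := by simp
      simp only [List.map_cons, htail, hhead, List.sum_cons]
      ring
    · -- head unchanged; (k,c) is in the tail
      have hmem' : (k, c) ∈ t := by
        rcases List.mem_cons.mp hmem with h | h
        · exact absurd (by rw [← h]) hq
        · exact h
      have hhead : (if ((q.1 == k) = true) then (k, c + 1) else q) = q := by simp [hq]
      simp only [List.map_cons, hhead, List.sum_cons]
      rw [ih hnd.2 hmem']
      ring

-- inserting key k with value getD k 0 + 1 raises the pvG-sum by pvG(c+1) - pvG(c)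
theorem pvS_insert (d : PySem.Dict (String × String) Int) (k : String × String)
    (hnd : d.keys.Nodup) :
    ((d.insert k (d.getD k 0 + 1)).values.map pvG).sum
      = ((d.values.map pvG).sum - pvG (d.getD k 0)) + pvG (d.getD k 0 + 1) := by
  by_cases hc : d.contains k = true
  · obtain ⟨c, hget⟩ : ∃ c, d.get? k = some c := by
      have := PySem.Dict.contains_eq_isSome_get? (d := d) (k := k)
      rw [hc] at this
      exact Option.isSome_iff_exists.mp this.symm
    have hgd : d.getD k 0 = c := PySem.Dict.getD_of_get?_eq_some d 0 hget
    have hmem : (k, c) ∈ d.items := PySem.Dict.mem_items_of_get?_eq_some d hget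
    rw [PySem.Dict.values, PySem.Dict.items_insert_of_contains _ _ hc, hgd]
    have := pvSum_replace d.items k c hnd hmem
    simpa [PySem.Dict.values, Function.comp] using this
  · have hc' : d.contains k = false := by simpa using hc
    have hgd : d.getD k 0 = 0 := PySem.Dict.getD_of_not_contains d 0 hc'
    rw [PySem.Dict.values, PySem.Dict.items_insert_of_not_contains _ _ hc', hgd]
    simp [PySem.Dict.values, pvG]

-- the B loop step keeps the same dictionary as the A loop step
theorem pvStepA_eq (d : PySem.Dict (String × String) Int) (p : String × String) :
    pvAStep d p
    = d.insert (if p.1 ≤ p.2 then (p.1, p.2) else (p.2, p.1))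
        (d.getD (if p.1 ≤ p.2 then (p.1, p.2) else (p.2, p.1)) 0 + 1) := by
  unfold pvAStep
  simp only [pvKeyA_eq]
  set k := if p.1 ≤ p.2 then (p.1, p.2) else (p.2, p.1) with hk
  by_cases hc : d.contains k = true
  · simp [hc]
  · have hc' : d.contains k = false := by simpa using hc
    rw [PySem.Dict.getD_of_not_contains d 0 hc']
    simp [hc']

-- main loop invariant: B's running total advances exactly by the change in A's pvG-sum
theorem pvMain (l : List (String × String)) (d : PySem.Dict (String × String) Int) (tot : Int)
    (hnd : d.keys.Nodup) (hpos : ∀ v ∈ d.values, 0 ≤ v) :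
    (l.foldl pvBStep (d, tot)).2
      = tot + (((l.foldl pvAStep d).values.map pvG).sum - (d.values.map pvG).sum) := by
  induction l generalizing d tot with
  | nil => simp
  | cons p t ih =>
    simp only [List.foldl]
    have hB : pvBStep (d, tot) p
        = (d.insert (if p.1 ≤ p.2 then (p.1, p.2) else (p.2, p.1))
            (d.getD (if p.1 ≤ p.2 then (p.1, p.2) else (p.2, p.1)) 0 + 1),
           tot + d.getD (if p.1 ≤ p.2 then (p.1, p.2) else (p.2, p.1)) 0) := rfl
    set k := if p.1 ≤ p.2 then (p.1, p.2) else (p.2, p.1) with hk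
    set c := d.getD k 0 with hcdef
    have hc0 : 0 ≤ c := by
      by_cases hc : d.contains k = true
      · obtain ⟨v, hget⟩ : ∃ v, d.get? k = some v := by
          have := PySem.Dict.contains_eq_isSome_get? (d := d) (k := k)
          rw [hc] at this
          exact Option.isSome_iff_exists.mp this.symm
        have : c = v := by rw [hcdef]; exact PySem.Dict.getD_of_get?_eq_some d 0 hget
        rw [this]
        exact hpos v (List.mem_map_of_mem (PySem.Dict.mem_items_of_get?_eq_some d hget))
      · have hc' : d.contains k = false := by simpa using hc
        rw [hcdef, PySem.Dict.getD_of_not_contains d 0 hc']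
        
    have hstep : pvAStep d p = d.insert k (c + 1) := pvStepA_eq d p
    rw [hB, hstep]
    have hnd' : (d.insert k (c + 1)).keys.Nodup := PySem.Dict.nodup_keys_insert _ _ _ hnd
    have hpos' : ∀ v ∈ (d.insert k (c + 1)).values, 0 ≤ v := by
      intro v hv
      rcases PySem.Dict.mem_values_insert d k (c + 1) v hv with h | h
      · omega
      · exact hpos v h
    rw [ih (d.insert k (c + 1)) (tot + c) hnd' hpos']
    have hS : ((d.insert k (c + 1)).values.map pvG).sum
        = ((d.values.map pvG).sum - pvG c) + pvG (c + 1) := pvS_insert d k hnd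
    have hg := pvG_succ c hc0
    omega

-- ===== VERDICT (by name: the statement is the Claim_ definition above) =====
theorem num_equiv_species_pairs_spec : Claim_equal_num_equiv_species_pairs := by
  intro l _
  unfold Spec_num_equiv_species_pairs num_equiv_species_pairs num_equiv_species_pairs_alt
  show ((l.foldl pvAStep PySem.Dict.empty).values).foldl (fun equiv_pairs count =>
      if count > 1 then equiv_pairs + PySem.Int.floordiv (count * (count - 1)) 2 else equiv_pairs) 0
    = (l.foldl pvBStep (PySem.Dict.empty, 0)).2
  rw [pvMain l PySem.Dict.empty 0 (by decide) (by intro v hv; cases hv), pvFoldA2]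
  have hempty : (PySem.Dict.empty : PySem.Dict (String × String) Int).values = [] := rfl
  rw [hempty]
  simp
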